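-- pv_equiv track=rewrite | github.com/hpghsu1314/MatrixSparsification | GamesCrafters/HomeFun/HomeFun2Game.py | check_left_diag
-- ===== SOURCE A (Python) =====
-- def check_left_diag(position):
--     lose = True
--     for i in range(len(position)-1):
--         if position[i][i] != position[i+1][i+1] or position[i][i] == None:
--             lose = False
--             break
--     if lose == True:
--         return True
--     return False
-- ===== SOURCE B (Python) =====
-- def check_left_diag(position):
--     if len(position) <= 1:
--         return True
--     diag = [position[i][i] for i in range(len(position))]
--     return diag[0] is not None and all(x == diag[0] for x in diag)
-- ===== Notes on version B (the rewrite author's own statement) =====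
-- stated objective: simpler
-- what changed: B builds the diagonal once with a comprehension and tests it globally (first entry non-None and every entry equal to it) instead of A's early-breaking adjacent-pair scan with a lose flag; Pre_ excludes ragged boards whose rows are too short to hold their diagonal cell, on some of which A breaks early and returns False while B raises IndexError.
-- outside the precondition, e.g. on check_left_diag([[1, None], [2, None], []]): A returns False, B raises IndexError
import Mathlib
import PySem

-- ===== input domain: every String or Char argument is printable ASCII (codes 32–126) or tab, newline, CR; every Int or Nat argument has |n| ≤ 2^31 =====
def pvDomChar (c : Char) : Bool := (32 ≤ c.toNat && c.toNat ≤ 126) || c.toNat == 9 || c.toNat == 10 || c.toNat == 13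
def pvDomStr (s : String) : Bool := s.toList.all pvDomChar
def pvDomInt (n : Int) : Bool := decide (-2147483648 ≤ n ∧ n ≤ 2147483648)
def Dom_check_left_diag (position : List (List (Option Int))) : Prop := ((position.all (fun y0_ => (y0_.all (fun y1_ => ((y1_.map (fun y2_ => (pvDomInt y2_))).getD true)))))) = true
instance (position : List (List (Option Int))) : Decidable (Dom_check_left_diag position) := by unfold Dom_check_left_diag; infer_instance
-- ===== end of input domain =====

-- B builds the diagonal once and tests it globally (non-None head, all entries equal to it)
-- instead of A's early-breaking adjacent-pair scan with a lose flag; same cost, simpler shape.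
-- ===== PORT A =====
-- position[i][i]: none = IndexError (excluded by Pre_)
def pvDiagA (position : List (List (Option Int))) (i : Int) : Option (Option Int) :=
  (PySem.List.pyGet? position i).bind (fun row => PySem.List.pyGet? row i)

-- the 'for i in range(len(position)-1)' loop with break; returns the final value of 'lose'
def pvLoopA (position : List (List (Option Int))) : List Int → Bool
  | [] => true
  | i :: rest =>
    match pvDiagA position i, pvDiagA position (i + 1) with
    | some x, some y => if x ≠ y ∨ x = none then false else pvLoopA position rest
    | _, _ => false   -- IndexError in Python; outside Pre_

def check_left_diag (position : List (List (Option Int))) : Bool :=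
  let lose := pvLoopA position (PySem.List.pyRange 0 ((position.length : Int) - 1) 1)
  if lose = true then true else false

-- ===== PORT B =====
def check_left_diag_alt (position : List (List (Option Int))) : Bool :=
  if position.length ≤ 1 then true
  else
    let diag := (PySem.List.pyRange 0 (position.length : Int) 1).map
      (fun i => (PySem.List.pyGet? position i).bind (fun row => PySem.List.pyGet? row i))
    match diag with
    | [] => true    -- unreachable: len(position) ≥ 2
    | d0 :: _ => d0 != some none && diag.all (fun x => x == d0)

-- ===== PRECONDITION & SPEC =====
-- Pre_ excludes ragged boards where some row i has at most i cells: there Python's position[i][i]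
-- raises IndexError in A (unless A breaks out earlier, in which case B still raises: see cites).
def Pre_check_left_diag (position : List (List (Option Int))) : Prop :=
  position.length ≤ 1 ∨ ∀ i, i < position.length → i < (position.getD i []).length
instance (position : List (List (Option Int))) : Decidable (Pre_check_left_diag position) := by
  unfold Pre_check_left_diag; infer_instance
def pvWitness_check_left_diag : List (List (Option Int)) :=
  [[some 1, some 0], [some 1, some 1]]

def Spec_check_left_diag (position : List (List (Option Int))) (out : Bool) : Prop := out = check_left_diag_alt position
instance (position : List (List (Option Int))) (out : Bool) : Decidable (Spec_check_left_diag position out) := by unfold Spec_check_left_diag; infer_instance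

-- ===== CLAIM (what is proved, stated in full; the proofs are below) =====
def Claim_equal_check_left_diag : Prop := ∀ (position : List (List (Option Int))), Dom_check_left_diag position → Pre_check_left_diag position → Spec_check_left_diag position (check_left_diag position)

-- ===== LEMMAS AND PROOFS =====

-- the diagonal value at index i (total form, used only under Pre_)
def pvD (position : List (List (Option Int))) (i : Nat) : Option Int :=
  (position.getD i []).getD i none

theorem pvDiagA_eq (position : List (List (Option Int))) (i : Nat)
    (hi : i < position.length) (hr : i < (position.getD i []).length) :
    pvDiagA position (i : Int) = some (pvD position i) := by
  unfold pvDiagA pvD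
  rw [PySem.List.pyGet?_natCast]
  have h1 : position[i]? = some position[i] := List.getElem?_eq_getElem hi
  rw [h1]
  simp only [Option.bind_some]
  rw [PySem.List.pyGet?_natCast]
  have h2 : position.getD i [] = position[i] := List.getD_eq_getElem position [] hi
  rw [h2] at hr ⊢
  rw [List.getElem?_eq_getElem hr, List.getD_eq_getElem _ none hr]

theorem pvLoopA_char (position : List (List (Option Int)))
    (hpre : ∀ i, i < position.length → i < (position.getD i []).length) :
    ∀ (m k : Nat), k + m = position.length - 1 →
    (pvLoopA position (PySem.List.pyRange (k : Int) ((position.length : Int) - 1) 1) = true ↔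
      ∀ j, k ≤ j → j < position.length - 1 →
        pvD position j = pvD position (j + 1) ∧ pvD position j ≠ none) := by
  intro m
  induction m with
  | zero =>
    intro k hk
    have hnil : PySem.List.pyRange (k : Int) ((position.length : Int) - 1) 1 = [] := by
      apply PySem.List.pyRange_one_eq_nil; omega
    rw [hnil]
    simp only [pvLoopA]
    constructor
    · intro _ j hj1 hj2; omega
    · intro _; trivial
  | succ m ih =>
    intro k hk
    have hklt : (k : Int) < (position.length : Int) - 1 := by omega
    rw [PySem.List.pyRange_one_cons hklt]
    have hk1 : ((k : Int) + 1) = ((k + 1 : Nat) : Int) := by push_cast; ring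
    have hkn : k < position.length := by omega
    have hk1n : k + 1 < position.length := by omega
    simp only [pvLoopA, hk1,
      pvDiagA_eq position k hkn (hpre k hkn),
      pvDiagA_eq position (k + 1) hk1n (hpre (k + 1) hk1n)]
    by_cases hc : pvD position k ≠ pvD position (k + 1) ∨ pvD position k = none
    · rw [if_pos hc]
      simp only [Bool.false_eq_true, false_iff]
      intro hall
      have := hall k (le_refl k) (by omega)
      tauto
    · rw [if_neg hc]
      rw [ih (k + 1) (by omega)]
      have hc1 : pvD position k = pvD position (k + 1) := by
        by_contra h; exact hc (Or.inl h)
      have hc2 : pvD position k ≠ none := fun h => hc (Or.inr h)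
      constructor
      · intro hall j hj1 hj2
        rcases Nat.eq_or_lt_of_le hj1 with rfl | hlt
        · exact ⟨hc1, hc2⟩
        · exact hall j hlt hj2
      · intro hall j hj1 hj2
        exact hall j (by omega) hj2

-- B's diagonal list under Pre_
theorem pvDiagList_eq (position : List (List (Option Int)))
    (hpre : ∀ i, i < position.length → i < (position.getD i []).length) :
    (PySem.List.pyRange 0 (position.length : Int) 1).map
      (fun i => (PySem.List.pyGet? position i).bind (fun row => PySem.List.pyGet? row i)) =
    (List.range position.length).map (fun i => some (pvD position i)) := by
  rw [PySem.List.pyRange_one]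
  simp only [List.map_map]
  apply List.map_congr_left
  intro i hi
  rw [List.mem_range] at hi
  simp only [Function.comp_apply, zero_add]
  exact pvDiagA_eq position i hi (hpre i hi)

theorem alt_char (position : List (List (Option Int)))
    (hpre : ∀ i, i < position.length → i < (position.getD i []).length)
    (hn : 2 ≤ position.length) :
    (check_left_diag_alt position = true ↔
      pvD position 0 ≠ none ∧ ∀ i, i < position.length → pvD position i = pvD position 0) := by
  unfold check_left_diag_alt
  rw [if_neg (by omega)]
  rw [pvDiagList_eq position hpre]
  obtain ⟨n, hn'⟩ : ∃ n, position.length = n + 2 := ⟨position.length - 2, by omega⟩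
  rw [hn']
  rw [show n + 2 = (n + 1) + 1 from rfl, List.range_succ_eq_map]
  simp only [List.map_cons, List.all_cons, Bool.and_eq_true, bne_iff_ne, ne_eq,
    Option.some.injEq, List.all_map, beq_iff_eq, List.all_eq_true,
    List.mem_range, Function.comp_apply]
  constructor
  · rintro ⟨h0, _, hall⟩
    refine ⟨h0, ?_⟩
    intro i hi
    rcases Nat.eq_zero_or_pos i with rfl | hpos
    · rfl
    · obtain ⟨j, rfl⟩ : ∃ j, i = j + 1 := ⟨i - 1, by omega⟩
      exact hall j (by omega)
  · rintro ⟨h0, hall⟩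
    refine ⟨h0, trivial, ?_⟩
    intro j hj
    exact hall (j + 1) (by omega)

theorem adjacent_iff_global (position : List (List (Option Int))) (hn : 2 ≤ position.length) :
    ((∀ j, 0 ≤ j → j < position.length - 1 →
        pvD position j = pvD position (j + 1) ∧ pvD position j ≠ none) ↔
      (pvD position 0 ≠ none ∧ ∀ i, i < position.length → pvD position i = pvD position 0)) := by
  constructor
  · intro hadj
    have hEq : ∀ i, i < position.length → pvD position i = pvD position 0 := by
      intro i
      induction i with
      | zero => intro _; rfl
      | succ j ih =>
        intro hj
        have hj' : j < position.length - 1 := by omega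
        have := (hadj j (by omega) hj').1
        rw [← this]
        exact ih (by omega)
    exact ⟨(hadj 0 (by omega) (by omega)).2, hEq⟩
  · rintro ⟨h0, hall⟩ j _ hj
    have h1 := hall j (by omega)
    have h2 := hall (j + 1) (by omega)
    rw [h1, h2]
    exact ⟨rfl, h0⟩

-- ===== VERDICT (by name: the statement is the Claim_ definition above) =====
theorem check_left_diag_spec : Claim_equal_check_left_diag := by
  intro position _ hpre
  unfold Spec_check_left_diag
  by_cases hn : position.length ≤ 1
  · -- loop body never runs; both sides are true
    unfold check_left_diag check_left_diag_alt
    rw [PySem.List.pyRange_one_eq_nil (by omega), if_pos hn]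
    simp [pvLoopA]
  · have hn2 : 2 ≤ position.length := by omega
    have hpre' : ∀ i, i < position.length → i < (position.getD i []).length := by
      rcases hpre with h | h
      · omega
      · exact h
    have h1 := pvLoopA_char position hpre' (position.length - 1) 0 (by omega)
    rw [Nat.cast_zero] at h1
    have hiff : pvLoopA position (PySem.List.pyRange 0 ((position.length : Int) - 1) 1) = true ↔
        check_left_diag_alt position = true :=
      h1.trans ((adjacent_iff_global position hn2).trans
        (alt_char position hpre' hn2).symm)
    unfold check_left_diag
    cases hB : check_left_diag_alt position with
    | false =>
      have hL : pvLoopA position (PySem.List.pyRange 0 ((position.length : Int) - 1) 1) = false := by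
        cases hval : pvLoopA position (PySem.List.pyRange 0 ((position.length : Int) - 1) 1) with
        | false => rfl
        | true =>
          have := hiff.mp hval
          simp [hB] at this
      simp [hL]
    | true =>
      simp [hiff.mpr hB]
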